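-- pv_equiv track=rewrite | github.com/LorisDematini/rct_rag | PDF_Re/Acronym/Abbreviation_unique.py | get_consistent_unique_acronyms
-- ===== SOURCE A (Python) =====
-- from collections import defaultdict
--
-- def get_consistent_unique_acronyms(data):
--     # Étape 1 : groupe toutes les définitions pour chaque acronyme (indépendamment de la casse)
--     normalized_acronyms = defaultdict(set)
--     original_forms = defaultdict(set)
--
--     for study_id, acronyms_dict in data.items():
--         for acronym, definition in acronyms_dict.items():
--             if acronym and definition:
--                 normalized = acronym.lower()
--                 normalized_acronyms[normalized].add(definition.strip().lower())
--                 original_forms[normalized].add(acronym)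
--
--     # Étape 2 : garde ceux qui ont une seule définition
--     unique_acronyms = {}
--     for norm_acronym, defs in normalized_acronyms.items():
--         if len(defs) == 1:
--             canonical = norm_acronym.upper()
--             unique_acronyms[canonical] = list(defs)[0]
--
--     return unique_acronyms
-- ===== SOURCE B (Python) =====
-- def get_consistent_unique_acronyms(data):
--     # Staged list pipeline, no sets/defaultdicts:
--     # 1) flatten every study's valid (acronym, definition) pairs, normalized;
--     # 2) collect the normalized acronyms in first-occurrence order;
--     # 3) for each such acronym, scan the flat list and keep it only if all
--     #    its normalized definitions are equal.
--     pairs = [(a.lower(), d.strip().lower())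
--              for acronyms in data.values()
--              for a, d in acronyms.items()
--              if a and d]
--     keys = []
--     for norm, _ in pairs:
--         if norm not in keys:
--             keys.append(norm)
--     out = {}
--     for k in keys:
--         defs = [d for p, d in pairs if p == k]
--         if all(d == defs[0] for d in defs):
--             out[k.upper()] = defs[0]
--     return out
-- ===== Notes on version B (the rewrite author's own statement) =====
-- stated objective: alternative
-- what changed: Replaces A's incremental defaultdict-of-set grouping (plus an unused original_forms dict and a separate singleton filter) with a staged list pipeline: flatten all valid pairs once, list the normalized acronyms in first-occurrence order, then keep each acronym by scanning the flat list and checking all its normalized definitions are equal; no sets or dicts of sets.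
import Mathlib
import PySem

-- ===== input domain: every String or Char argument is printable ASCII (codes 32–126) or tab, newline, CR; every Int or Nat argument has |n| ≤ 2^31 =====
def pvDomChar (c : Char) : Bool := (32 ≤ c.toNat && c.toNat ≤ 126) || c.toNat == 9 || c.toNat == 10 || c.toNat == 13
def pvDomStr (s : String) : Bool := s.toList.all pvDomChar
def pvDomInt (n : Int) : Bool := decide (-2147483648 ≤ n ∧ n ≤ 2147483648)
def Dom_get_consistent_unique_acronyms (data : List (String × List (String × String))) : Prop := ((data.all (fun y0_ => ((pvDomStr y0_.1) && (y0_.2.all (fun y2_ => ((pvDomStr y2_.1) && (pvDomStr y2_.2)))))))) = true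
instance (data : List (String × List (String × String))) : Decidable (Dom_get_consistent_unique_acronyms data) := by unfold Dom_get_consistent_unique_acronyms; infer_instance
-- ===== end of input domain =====

-- B replaces A's incremental defaultdict-of-set grouping (plus an unused
-- original_forms dict and a separate singleton-filter loop) by a staged list
-- pipeline: flatten the valid normalized pairs once, list the acronyms in
-- first-occurrence order, then keep each acronym by a per-key scan of the
-- flat list checking all its definitions agree (alternative, not faster).

-- ===== PORT A =====
-- body of A's inner 'for acronym, definition in acronyms_dict.items()' loop
def pvAStep (st : PySem.Dict String (PySem.Set String) × PySem.Dict String (PySem.Set String))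
    (kv : String × String) :
    PySem.Dict String (PySem.Set String) × PySem.Dict String (PySem.Set String) :=
  if kv.1 ≠ "" ∧ kv.2 ≠ "" then
    let normalized := PySem.Str.lower kv.1
    (st.1.modify normalized PySem.Set.empty
        (fun s => PySem.Set.add s (PySem.Str.lower (PySem.Str.strip kv.2))),
     st.2.modify normalized PySem.Set.empty (fun s => PySem.Set.add s kv.1))
  else st

def get_consistent_unique_acronyms (data : List (String × List (String × String))) : List (String × String) :=
  -- Étape 1: the two grouping defaultdicts
  let st := data.foldl (fun st entry => entry.2.foldl pvAStep st)
    (PySem.Dict.empty, PySem.Dict.empty)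
  -- Étape 2: keep the acronyms with a single definition
  -- 'list(defs)[0]' rendered as headD "" (the guard len = 1 makes defs nonempty)
  let unique := st.1.items.foldl
    (fun (u : PySem.Dict String String) kv =>
      if kv.2.length = 1 then u.insert (PySem.Str.upper kv.1) (kv.2.headD "") else u)
    PySem.Dict.empty
  unique.items

-- ===== PORT B =====
-- step 1: the flattening comprehension over all valid (acronym, definition) pairs
def pvPairs (data : List (String × List (String × String))) : List (String × String) :=
  data.flatMap (fun entry =>
    (entry.2.filter (fun kv => kv.1 ≠ "" ∧ kv.2 ≠ "")).map
      (fun kv => (PySem.Str.lower kv.1, PySem.Str.lower (PySem.Str.strip kv.2))))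

def get_consistent_unique_acronyms_alt (data : List (String × List (String × String))) : List (String × String) :=
  let pairs := pvPairs data
  -- step 2: normalized acronyms in first-occurrence order
  let keys := pairs.foldl (fun (ks : List String) p =>
    if ks.contains p.1 then ks else ks ++ [p.1]) []
  -- step 3: per-key scan of the flat pair list
  (keys.foldl (fun (out : PySem.Dict String String) k =>
      match (pairs.filter (fun p => p.1 == k)).map Prod.snd with
      | [] => out  -- unreachable: every k in keys occurs in pairs
      | d0 :: ds => if (d0 :: ds).all (fun d => d == d0)
                    then out.insert (PySem.Str.upper k) d0 else out)
    PySem.Dict.empty).items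

-- ===== PRECONDITION & SPEC =====
def Spec_get_consistent_unique_acronyms (data : List (String × List (String × String))) (out : List (String × String)) : Prop := out = get_consistent_unique_acronyms_alt data
instance (data : List (String × List (String × String))) (out : List (String × String)) : Decidable (Spec_get_consistent_unique_acronyms data out) := by unfold Spec_get_consistent_unique_acronyms; infer_instance

-- ===== CLAIM (what is proved, stated in full; the proofs are below) =====
def Claim_equal_get_consistent_unique_acronyms : Prop := ∀ (data : List (String × List (String × String))), Dom_get_consistent_unique_acronyms data → Spec_get_consistent_unique_acronyms data (get_consistent_unique_acronyms data)

-- ===== LEMMAS AND PROOFS =====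

-- A's first accumulator ignores the second: project the pair-state fold
theorem pv_fst_fold (l : List (String × String))
    (st : PySem.Dict String (PySem.Set String) × PySem.Dict String (PySem.Set String)) :
    (l.foldl pvAStep st).1 = l.foldl
      (fun d kv => if kv.1 ≠ "" ∧ kv.2 ≠ "" then
          d.modify (PySem.Str.lower kv.1) PySem.Set.empty
            (fun s => PySem.Set.add s (PySem.Str.lower (PySem.Str.strip kv.2)))
        else d) st.1 := by
  induction l generalizing st with
  | nil => rfl
  | cons kv t ih =>
    rw [List.foldl_cons, List.foldl_cons, ih]
    unfold pvAStep
    by_cases h : kv.1 ≠ "" ∧ kv.2 ≠ "" <;> simp [h]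

-- guarded normalizing fold = plain modify-fold over the filtered, normalized pairs
theorem pv_flat_fold (l : List (String × String)) (d : PySem.Dict String (PySem.Set String)) :
    l.foldl
      (fun d kv => if kv.1 ≠ "" ∧ kv.2 ≠ "" then
          d.modify (PySem.Str.lower kv.1) PySem.Set.empty
            (fun s => PySem.Set.add s (PySem.Str.lower (PySem.Str.strip kv.2)))
        else d) d
    = ((l.filter (fun kv => kv.1 ≠ "" ∧ kv.2 ≠ "")).map
        (fun kv => (PySem.Str.lower kv.1, PySem.Str.lower (PySem.Str.strip kv.2)))).foldl
      (fun d p => d.modify p.1 PySem.Set.empty (fun s => PySem.Set.add s p.2)) d := by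
  induction l generalizing d with
  | nil => rfl
  | cons kv t ih =>
    simp only [List.foldl_cons, List.filter_cons]
    by_cases h : kv.1 ≠ "" ∧ kv.2 ≠ ""
    · rw [if_pos h, if_pos (decide_eq_true h), List.map_cons, List.foldl_cons, ih]
    · rw [if_neg h, if_neg (by simpa using h)]
      exact ih d

-- getD of the grouping fold: the Set of all definitions filed under c
theorem pv_getD_group (l : List (String × String)) (d : PySem.Dict String (PySem.Set String)) (c : String) :
    (l.foldl (fun d p => d.modify p.1 PySem.Set.empty (fun s => PySem.Set.add s p.2)) d).getD c PySem.Set.empty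
      = PySem.Set.update (d.getD c PySem.Set.empty) ((l.filter (fun p => p.1 == c)).map Prod.snd) := by
  induction l generalizing d with
  | nil => rfl
  | cons p t ih =>
    rw [List.foldl_cons, ih, List.filter_cons]
    by_cases h : p.1 = c
    · simp [h, PySem.Set.update]
    · simp [h, PySem.Dict.getD_modify, Ne.symm h]

theorem pv_update_append (s : PySem.Set String) (l : List String) :
    ∃ t, PySem.Set.update s l = s ++ t := by
  induction l generalizing s with
  | nil => exact ⟨[], by simp [PySem.Set.update]⟩
  | cons x l ih =>
    show ∃ t, PySem.Set.update (PySem.Set.add s x) l = s ++ t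
    by_cases hc : PySem.Set.contains s x = true
    · obtain ⟨t, ht⟩ := ih s
      exact ⟨t, by rw [PySem.Set.add, if_pos hc]; exact ht⟩
    · obtain ⟨t, ht⟩ := ih (s ++ [x])
      exact ⟨x :: t, by rw [PySem.Set.add, if_neg hc]; simpa using ht⟩

theorem pv_update_const (d0 : String) (l : List String) (h : ∀ x ∈ l, x = d0) :
    PySem.Set.update [d0] l = [d0] := by
  induction l with
  | nil => rfl
  | cons x t ih =>
    have hx := h x (by simp)
    subst hx
    have : PySem.Set.update [x] (x :: t) = PySem.Set.update (PySem.Set.add [x] x) t := rfl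
    rw [this]
    have : PySem.Set.add [x] x = [x] := by simp [PySem.Set.add, PySem.Set.contains]
    rw [this]
    exact ih (fun y hy => h y (by simp [hy]))

-- A's nested guarded fold = one modify-fold over the flat normalized pair list
theorem pv_group (data : List (String × List (String × String)))
    (st : PySem.Dict String (PySem.Set String) × PySem.Dict String (PySem.Set String)) :
    (data.foldl (fun st entry => entry.2.foldl pvAStep st) st).1
    = (pvPairs data).foldl
        (fun d p => d.modify p.1 PySem.Set.empty (fun s => PySem.Set.add s p.2)) st.1 := by
  induction data generalizing st with
  | nil => rfl
  | cons e t ih =>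
    rw [List.foldl_cons, ih]
    show _ = ((e.2.filter (fun kv => kv.1 ≠ "" ∧ kv.2 ≠ "")).map
        (fun kv => (PySem.Str.lower kv.1, PySem.Str.lower (PySem.Str.strip kv.2)))
        ++ pvPairs t).foldl _ st.1
    rw [List.foldl_append, ← pv_flat_fold, ← pv_fst_fold]

-- B's key-collecting loop is set(map fst pairs) in first-occurrence order
theorem pv_keys_eq (pairs : List (String × String)) :
    (pairs.foldl (fun (ks : List String) p => if ks.contains p.1 then ks else ks ++ [p.1]) [])
    = PySem.Set.ofList (pairs.map Prod.fst) := by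
  rw [PySem.Set.ofList_eq_foldl, List.foldl_map]
  rfl

-- the per-key agreement of the two filtering loops
theorem pv_key_step (u : PySem.Dict String String) (k d0 : String) (rest : List String) :
    (if (PySem.Set.ofList (d0 :: rest)).length = 1
     then u.insert (PySem.Str.upper k) ((PySem.Set.ofList (d0 :: rest)).headD "") else u)
    = (if (d0 :: rest).all (fun d => d == d0)
       then u.insert (PySem.Str.upper k) d0 else u) := by
  have hco : PySem.Set.ofList (d0 :: rest) = PySem.Set.update [d0] rest := rfl
  by_cases hall : (d0 :: rest).all (fun d => d == d0) = true
  · have hc : PySem.Set.ofList (d0 :: rest) = [d0] := by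
      rw [hco, pv_update_const d0 rest]
      intro x hx
      simpa using (List.all_eq_true.mp hall) x (by simp [hx])
    rw [if_pos hall, hc]
    simp
  · obtain ⟨t, ht⟩ := pv_update_append [d0] rest
    rw [← hco] at ht
    have hx : ∃ x ∈ rest, x ≠ d0 := by
      by_contra hc
      apply hall
      rw [List.all_eq_true]
      intro x hxm2
      rcases List.mem_cons.mp hxm2 with rfl | h
      · simp
      · simp only [beq_iff_eq]
        by_contra hne
        exact hc ⟨x, h, hne⟩
    obtain ⟨x, hxr, hxd⟩ := hx
    have hxm : x ∈ PySem.Set.ofList (d0 :: rest) :=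
      (PySem.Set.mem_ofList _ _).mpr (by simp [hxr])
    have htne : t ≠ [] := by
      rintro rfl
      rw [ht] at hxm
      simp at hxm
      exact hxd hxm
    have hlen : (PySem.Set.ofList (d0 :: rest)).length ≠ 1 := by
      rw [ht]
      cases t with
      | nil => exact absurd rfl htne
      | cons y ys => simp
    rw [if_neg hlen, if_neg hall]

-- every collected key occurs in the pair list, so its definition list is nonempty
theorem pv_defs_ne (pairs : List (String × String)) (k : String)
    (hk : k ∈ pairs.map Prod.fst) :
    (pairs.filter (fun p => p.1 == k)).map Prod.snd ≠ [] := by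
  obtain ⟨p, hp, hpk⟩ := List.mem_map.mp hk
  have : p ∈ pairs.filter (fun p => p.1 == k) :=
    List.mem_filter.mpr ⟨hp, by simp [hpk]⟩
  simp only [ne_eq, List.map_eq_nil_iff, List.filter_eq_nil_iff]
  exact fun h => by simpa using h p hp (by simp [hpk])

-- ===== VERDICT (by name: the statement is the Claim_ definition above) =====
theorem get_consistent_unique_acronyms_spec : Claim_equal_get_consistent_unique_acronyms := by
  intro data _
  unfold Spec_get_consistent_unique_acronyms
  simp only [get_consistent_unique_acronyms, get_consistent_unique_acronyms_alt]
  rw [pv_group, pv_keys_eq]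
  set pairs := pvPairs data with hpairs
  set d1 := pairs.foldl
    (fun d p => d.modify p.1 PySem.Set.empty (fun s => PySem.Set.add s p.2))
    PySem.Dict.empty with hd1
  have hnd : d1.keys.Nodup :=
    PySem.Dict.nodup_keys_foldl_modify_key _ _ _ _ _ (by simp [PySem.Dict.keys_empty])
  have hkeys : d1.keys = PySem.Set.ofList (pairs.map Prod.fst) := by
    rw [hd1, PySem.Dict.keys_foldl_modify_key]
    simp [PySem.Dict.keys_empty, PySem.Set.update, PySem.Set.ofList]
  have hg : ∀ c, d1.getD c PySem.Set.empty
      = PySem.Set.ofList ((pairs.filter (fun p => p.1 == c)).map Prod.snd) := by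
    intro c
    rw [hd1, pv_getD_group]
    simp [PySem.Dict.getD_empty, PySem.Set.update, PySem.Set.ofList]
  have hitems : d1.items = (PySem.Set.ofList (pairs.map Prod.fst)).map
      (fun k => (k, PySem.Set.ofList ((pairs.filter (fun p => p.1 == k)).map Prod.snd))) := by
    rw [PySem.Dict.items_eq_map_keys d1 hnd PySem.Set.empty, hkeys]
    exact List.map_congr_left (fun k _ => by rw [hg])
  rw [hitems, List.foldl_map]
  congr 1
  apply PySem.List.foldl_congr_mem'
  intro k hk u
  have hkp : k ∈ pairs.map Prod.fst := (PySem.Set.mem_ofList _ _).mp hk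
  obtain ⟨d0, rest, hds⟩ :=
    List.exists_cons_of_ne_nil (pv_defs_ne pairs k hkp)
  rw [hds]
  exact pv_key_step u k d0 rest
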